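-- pv_equiv track=rewrite | github.com/victor-gil-sepulveda/pyProCT | pyproclust/htmlreport/htmlReport.py | order_analysis_keys
-- ===== SOURCE A (Python) =====
-- def order_analysis_keys(mykeys):
--     top_keys = ["Details","Number of clusters","Mean cluster size","Noise level"]
--     ordered_keys = []
--
--     last_keys = []
--     for key in mykeys:
--         if "Score" in key:
--             last_keys.append(key)
--
--     middle_keys = []
--     for key in mykeys:
--         if not key in last_keys and not key in top_keys:
--             middle_keys.append(key)
--
--
--     for key in top_keys+middle_keys+last_keys:
--         ordered_keys.append(key)
--
--     return ordered_keys
-- ===== SOURCE B (Python) =====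
-- def order_analysis_keys(mykeys):
--     top_keys = ["Details","Number of clusters","Mean cluster size","Noise level"]
--     middle_keys = []
--     last_keys = []
--     for key in mykeys:
--         if "Score" in key:
--             last_keys.append(key)
--         elif key not in top_keys:
--             middle_keys.append(key)
--     return top_keys + middle_keys + last_keys
-- ===== Notes on version B (the rewrite author's own statement) =====
-- stated objective: simpler
-- what changed: One partitioning pass that tests "Score" in key directly replaces A's two dependent loops, eliminating the O(n) 'key in last_keys' scan inside the second loop and the redundant final copy loop.
import Mathlib
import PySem

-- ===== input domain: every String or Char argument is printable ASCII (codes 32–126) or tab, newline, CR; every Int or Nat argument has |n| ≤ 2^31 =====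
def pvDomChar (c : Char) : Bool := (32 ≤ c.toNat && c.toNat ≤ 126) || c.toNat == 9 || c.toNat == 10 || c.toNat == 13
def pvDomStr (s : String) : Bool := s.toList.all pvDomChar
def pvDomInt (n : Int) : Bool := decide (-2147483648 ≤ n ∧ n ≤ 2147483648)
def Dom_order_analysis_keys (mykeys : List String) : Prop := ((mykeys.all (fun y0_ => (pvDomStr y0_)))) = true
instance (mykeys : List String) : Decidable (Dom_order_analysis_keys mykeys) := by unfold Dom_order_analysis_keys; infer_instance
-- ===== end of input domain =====

-- ===== PORT A =====
-- B: one partitioning pass (testing "Score" in key directly) replaces A's two dependent loops and final copy loop; objective: simpler.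
def order_analysis_keys (mykeys : List String) : List String :=
  let top_keys : List String := ["Details","Number of clusters","Mean cluster size","Noise level"]
  let last_keys : List String :=
    mykeys.foldl (fun acc key => if PySem.Str.isIn "Score" key then acc ++ [key] else acc) []
  let middle_keys : List String :=
    mykeys.foldl (fun acc key =>
      if !(last_keys.contains key) && !(top_keys.contains key) then acc ++ [key] else acc) []
  (top_keys ++ middle_keys ++ last_keys).foldl (fun acc key => acc ++ [key]) []

-- ===== PORT B =====
def order_analysis_keys_alt (mykeys : List String) : List String :=
  let top_keys : List String := ["Details","Number of clusters","Mean cluster size","Noise level"]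
  let p :=
    mykeys.foldl (fun (p : List String × List String) key =>
      if PySem.Str.isIn "Score" key then (p.1, p.2 ++ [key])
      else if top_keys.contains key then p
      else (p.1 ++ [key], p.2)) ([], [])
  top_keys ++ p.1 ++ p.2

-- ===== PRECONDITION & SPEC =====
def Spec_order_analysis_keys (mykeys : List String) (out : List String) : Prop := out = order_analysis_keys_alt mykeys
instance (mykeys : List String) (out : List String) : Decidable (Spec_order_analysis_keys mykeys out) := by unfold Spec_order_analysis_keys; infer_instance

-- ===== CLAIM (what is proved, stated in full; the proofs are below) =====
def Claim_equal_order_analysis_keys : Prop := ∀ (mykeys : List String), Dom_order_analysis_keys mykeys → Spec_order_analysis_keys mykeys (order_analysis_keys mykeys)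

-- ===== LEMMAS AND PROOFS =====

-- ===== VERDICT (by name: the statement is the Claim_ definition above) =====
-- B's single pass as a pair of filters
theorem alt_fold_filters (xs : List String) (m l : List String) :
    xs.foldl (fun (p : List String × List String) key =>
      if PySem.Str.isIn "Score" key then (p.1, p.2 ++ [key])
      else if (["Details","Number of clusters","Mean cluster size","Noise level"] : List String).contains key then p
      else (p.1 ++ [key], p.2)) (m, l)
    = (m ++ xs.filter (fun key => !(PySem.Str.isIn "Score" key) &&
          !((["Details","Number of clusters","Mean cluster size","Noise level"] : List String).contains key)),
       l ++ xs.filter (fun key => PySem.Str.isIn "Score" key)) := by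
  induction xs generalizing m l with
  | nil => simp
  | cons x xs ih =>
    simp only [List.foldl_cons, List.filter_cons]
    by_cases hs : PySem.Str.isIn "Score" x = true
    · rw [if_pos hs, ih]
      simp at hs ⊢
      simp [hs]
    · rw [if_neg hs]
      by_cases ht : (["Details","Number of clusters","Mean cluster size","Noise level"] : List String).contains x = true
      · rw [if_pos ht, ih]
        simp at hs ht ⊢
        simp [hs]
        tauto
      · rw [if_neg ht, ih]
        simp at hs ht ⊢
        simp [hs, ht]

-- copying a list element by element is the identity
theorem foldl_copy (xs acc : List String) :
    xs.foldl (fun acc key => acc ++ [key]) acc = acc ++ xs := by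
  induction xs generalizing acc with
  | nil => simp
  | cons x xs ih => simp [ih]

-- for keys of mykeys, membership in A's last_keys is exactly the "Score" test
theorem mem_last_keys (mykeys : List String) (k : String) (hk : k ∈ mykeys) :
    (mykeys.filter (fun key => PySem.Str.isIn "Score" key)).contains k
      = PySem.Str.isIn "Score" k := by
  by_cases h : PySem.Str.isIn "Score" k = true
  · rw [h]
    simp [List.mem_filter, hk]
    simpa using h
  · rw [Bool.eq_false_iff.mpr h]
    simp [List.mem_filter]
    intro _
    simpa using h

theorem order_analysis_keys_spec : Claim_equal_order_analysis_keys := by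
  intro mykeys _
  unfold Spec_order_analysis_keys order_analysis_keys order_analysis_keys_alt
  simp only [alt_fold_filters, PySem.List.foldl_append_if_eq_filter, foldl_copy,
    List.nil_append, List.append_assoc, List.append_cancel_left_eq]
  rw [List.filter_congr (fun k hk => by rw [mem_last_keys mykeys k hk])]
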